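-- pv_equiv track=rewrite | github.com/mmegane/Spotify-Chord-Analyzer | main.py | return_hamming_distances
-- ===== SOURCE A (Python) =====
-- def return_hamming_distance(a, b):
--
--     N = len(a)
--
--     if N != len(b):
--         raise ValueError("Arguments must have equal length")
--
--     dist = 0
--     for i in range(N):
--
--         value_a = a[i]
--         value_b = b[i]
--
--         if value_a != value_b:
--             dist +=1
--
--     return(dist)
--
-- def return_hamming_distances(a, b):
--
--     N_a = len(a)
--     N_b = len(b)
--
--     if N_b > N_b:
--         raise ValueError("The second argument cannot be larger than the first")
--
--     dists = []
--
--     for i in range(N_a - N_b + 1):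
--
--         left_pad = i
--         right_pad = (N_a - N_b) - i
--
--         c = [0] * left_pad + b + [0] * right_pad
--
--         dist = return_hamming_distance(a, c)
--
--         dists.append(dist)
--
--     return(dists)
-- ===== SOURCE B (Python) =====
-- def return_hamming_distances(a, b):
--     N_a = len(a)
--     N_b = len(b)
--
--     # Outside the window b is zero-padded, so a position there mismatches
--     # exactly when a is nonzero: count a's nonzeros once, then per offset
--     # only scan the length-N_b window (no padded copy of b is ever built).
--     total = sum(1 for x in a if x != 0)
--
--     dists = []
--     for i in range(N_a - N_b + 1):
--         w = a[i:i + N_b]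
--         inside = sum(1 for x in w if x != 0)
--         window = sum(1 for x, y in zip(w, b) if x != y)
--         dists.append(total - inside + window)
--     return dists
-- ===== Notes on version B (the rewrite author's own statement) =====
-- stated objective: alternative
-- what changed: Instead of building a zero-padded copy of b and rescanning all of a for every offset, B counts a's nonzeros once and per offset scans only the length-N_b window (outside the window a mismatch is exactly a nonzero of a).
import Mathlib
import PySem

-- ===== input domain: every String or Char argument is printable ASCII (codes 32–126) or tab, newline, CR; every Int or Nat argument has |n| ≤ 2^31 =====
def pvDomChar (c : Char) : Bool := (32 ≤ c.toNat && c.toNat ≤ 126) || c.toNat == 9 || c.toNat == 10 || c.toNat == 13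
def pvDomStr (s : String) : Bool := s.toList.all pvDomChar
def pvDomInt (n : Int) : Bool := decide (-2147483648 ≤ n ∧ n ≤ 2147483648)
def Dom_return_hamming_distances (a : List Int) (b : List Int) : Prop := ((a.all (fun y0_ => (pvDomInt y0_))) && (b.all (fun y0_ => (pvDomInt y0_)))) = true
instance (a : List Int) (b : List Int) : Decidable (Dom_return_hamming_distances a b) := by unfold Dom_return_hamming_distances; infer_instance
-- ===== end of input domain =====

-- B avoids A's per-offset zero-padded copy of b and full rescan of a: it counts
-- a's nonzeros once and per offset scans only the length-N_b window.

-- ===== PORT A =====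
-- helper return_hamming_distance: none = the ValueError branch (unequal lengths);
-- A only calls it with equal lengths, so the none case is unreachable there.
def return_hamming_distance (a : List Int) (b : List Int) : Option Int :=
  let N : Int := PySem.List.len a
  if N ≠ PySem.List.len b then none
  else some ((PySem.List.pyRange 0 N 1).foldl (fun dist i =>
    let value_a := PySem.List.pyGetD a i 0
    let value_b := PySem.List.pyGetD b i 0
    if value_a ≠ value_b then dist + 1 else dist) 0)

def return_hamming_distances (a : List Int) (b : List Int) : List Int :=
  let Na : Int := PySem.List.len a
  let Nb : Int := PySem.List.len b
  -- Python's 'if N_b > N_b: raise' guard is dead code (the condition is never true); omitted.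
  (PySem.List.pyRange 0 (Na - Nb + 1) 1).foldl (fun dists i =>
    let left_pad := i
    let right_pad := (Na - Nb) - i
    let c := PySem.List.pyRepeat [(0 : Int)] left_pad ++ b ++ PySem.List.pyRepeat [(0 : Int)] right_pad
    -- c has length Na by construction, so the helper never hits its error branch; .getD 0 is unreachable
    dists ++ [(return_hamming_distance a c).getD 0]) []

-- ===== PORT B =====
def return_hamming_distances_alt (a : List Int) (b : List Int) : List Int :=
  let Na : Int := PySem.List.len a
  let Nb : Int := PySem.List.len b
  -- total = sum(1 for x in a if x != 0)
  let total : Int := ((a.filter (fun x => decide (x ≠ 0))).map (fun _ => (1 : Int))).sum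
  (PySem.List.pyRange 0 (Na - Nb + 1) 1).foldl (fun dists i =>
    let w := PySem.List.slice a (some i) (some (i + Nb))
    let inside : Int := ((w.filter (fun x => decide (x ≠ 0))).map (fun _ => (1 : Int))).sum
    let window : Int := (((w.zip b).filter (fun p => decide (p.1 ≠ p.2))).map (fun _ => (1 : Int))).sum
    dists ++ [total - inside + window]) []

-- ===== PRECONDITION & SPEC =====
def Spec_return_hamming_distances (a : List Int) (b : List Int) (out : List Int) : Prop := out = return_hamming_distances_alt a b
instance (a : List Int) (b : List Int) (out : List Int) : Decidable (Spec_return_hamming_distances a b out) := by unfold Spec_return_hamming_distances; infer_instance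

-- ===== CLAIM (what is proved, stated in full; the proofs are below) =====
def Claim_equal_return_hamming_distances : Prop := ∀ (a : List Int) (b : List Int), Dom_return_hamming_distances a b → Spec_return_hamming_distances a b (return_hamming_distances a b)

-- ===== LEMMAS AND PROOFS =====

-- sum(1 for x in filter) is countP
lemma sum_map_one_filter {α : Type} (p : α → Bool) (l : List α) :
    ((l.filter p).map (fun _ => (1 : Int))).sum = (l.countP p : Int) := by
  induction l with
  | nil => simp
  | cons x t ih =>
    by_cases h : p x
    · simp [h, List.countP_eq_length_filter]
      omega
    · simp [h, List.countP_eq_length_filter]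

-- index-loop hamming count = countP over the zip (equal-length lists)
lemma countP_range_zip (a c : List Int) (h : a.length = c.length) :
    (List.range a.length).countP (fun k => decide (a.getD k 0 ≠ c.getD k 0))
      = (a.zip c).countP (fun p => decide (p.1 ≠ p.2)) := by
  induction a generalizing c with
  | nil => simp
  | cons x t ih =>
    cases c with
    | nil => simp at h
    | cons y s =>
      simp only [List.length_cons, List.range_succ_eq_map, List.countP_cons,
        List.countP_map, List.zip_cons_cons]
      simp only [List.getD_cons_zero, List.getD_cons_succ, Function.comp_def]
      rw [ih s (by simpa using h)]

-- zip against a zero block counts the nonzeros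
lemma countP_zip_replicate (xs : List Int) (n : Nat) (h : xs.length = n) :
    (xs.zip (List.replicate n (0 : Int))).countP (fun p => decide (p.1 ≠ p.2))
      = xs.countP (fun x => decide (x ≠ 0)) := by
  induction xs generalizing n with
  | nil => simp
  | cons x t ih =>
    cases n with
    | zero => simp at h
    | succ m =>
      simp only [List.replicate_succ, List.zip_cons_cons, List.countP_cons]
      rw [ih m (by simpa using h)]

-- the value A computes at offset i (as a Nat n with n + b.length ≤ a.length)
lemma portA_at (a b : List Int) (n : Nat) (hn : n + b.length ≤ a.length) :
    (return_hamming_distance a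
        (PySem.List.pyRepeat [(0 : Int)] (n : Int) ++ b ++
         PySem.List.pyRepeat [(0 : Int)] (((a.length : Int) - (b.length : Int)) - (n : Int)))).getD 0
      = ((a.take n).countP (fun x => decide (x ≠ 0)) : Int)
        + (((a.drop n).take b.length).zip b).countP (fun p => decide (p.1 ≠ p.2))
        + ((a.drop (n + b.length)).countP (fun x => decide (x ≠ 0)) : Int) := by
  have hrep : ((a.length : Int) - (b.length : Int)) - (n : Int) = ((a.length - b.length - n : Nat) : Int) := by
    omega
  rw [hrep]
  simp only [PySem.List.pyRepeat_singleton, Int.toNat_natCast]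
  set r : Nat := a.length - b.length - n with hr
  set c : List Int := List.replicate n (0 : Int) ++ b ++ List.replicate r (0 : Int) with hc
  have hlen : c.length = a.length := by simp [hc]; omega
  rw [return_hamming_distance]
  simp only [PySem.List.len_eq, hlen]
  rw [if_neg (by simp), PySem.List.foldl_ite_add_one, PySem.List.pyRange_zero_nat,
    Option.getD_some, zero_add, List.countP_map]
  have hcong : (List.range a.length).countP
      ((fun i => decide (PySem.List.pyGetD a i 0 ≠ PySem.List.pyGetD c i 0)) ∘ (fun k : Nat => (k : Int)))
      = (List.range a.length).countP (fun k => decide (a.getD k 0 ≠ c.getD k 0)) := by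
    apply List.countP_congr
    intro k _
    simp [Function.comp, PySem.List.pyGetD_natCast]
  rw [hcong, countP_range_zip a c hlen.symm]
  -- split a into the three blocks matching c
  have ha : a = a.take n ++ ((a.drop n).take b.length ++ a.drop (n + b.length)) := by
    rw [← List.drop_drop, List.take_append_drop, List.take_append_drop]
  have l1 : (a.take n).length = n := by rw [List.length_take]; omega
  have l2 : ((a.drop n).take b.length).length = b.length := by
    rw [List.length_take, List.length_drop]; omega
  have l3 : (a.drop (n + b.length)).length = r := by rw [List.length_drop]; omega
  have key : (a.zip c).countP (fun p => decide (p.1 ≠ p.2))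
      = (a.take n).countP (fun x => decide (x ≠ 0))
        + (((a.drop n).take b.length).zip b).countP (fun p => decide (p.1 ≠ p.2))
        + (a.drop (n + b.length)).countP (fun x => decide (x ≠ 0)) := by
    nth_rewrite 1 [ha]
    rw [hc, List.append_assoc,
        List.zip_append (by rw [l1, List.length_replicate]),
        List.zip_append (by rw [l2]), List.countP_append, List.countP_append,
        countP_zip_replicate _ _ l1, countP_zip_replicate _ _ l3]
    omega
  rw [key]
  omega

-- ===== VERDICT (by name: the statement is the Claim_ definition above) =====
theorem return_hamming_distances_spec : Claim_equal_return_hamming_distances := by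
  intro a b _
  unfold Spec_return_hamming_distances return_hamming_distances return_hamming_distances_alt
  simp only [PySem.List.len_eq]
  rw [PySem.List.foldl_append_singleton_eq_map, PySem.List.foldl_append_singleton_eq_map]
  simp only [List.nil_append]
  apply List.map_congr_left
  intro i hi
  rw [PySem.List.mem_pyRange_one] at hi
  obtain ⟨h0, hlt⟩ := hi
  -- i is a Nat n with n + b.length ≤ a.length
  obtain ⟨n, rfl⟩ : ∃ n : Nat, i = (n : Int) := ⟨i.toNat, (Int.toNat_of_nonneg h0).symm⟩
  have hn : n + b.length ≤ a.length := by
    have := hlt; push_cast at this ⊢; omega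
  rw [portA_at a b n hn]
  -- B's slice is the window block
  have hw : PySem.List.slice a (some (n : Int)) (some ((n : Int) + (b.length : Int)))
      = (a.drop n).take b.length := PySem.List.slice_natCast_add a n b.length
  rw [hw]
  rw [sum_map_one_filter, sum_map_one_filter, sum_map_one_filter]
  -- total = take-part + window-part + drop-part
  have hsplit : a.countP (fun x => decide (x ≠ 0))
      = (a.take n).countP (fun x => decide (x ≠ 0))
        + ((a.drop n).take b.length).countP (fun x => decide (x ≠ 0))
        + (a.drop (n + b.length)).countP (fun x => decide (x ≠ 0)) := by
    nth_rewrite 1 [show a = a.take n ++ ((a.drop n).take b.length ++ a.drop (n + b.length)) by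
      rw [← List.drop_drop, List.take_append_drop, List.take_append_drop]]
    rw [List.countP_append, List.countP_append]
    omega
  rw [hsplit]
  push_cast; ring
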